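-- pv_equiv track=rewrite | github.com/jyshtty/Scaler_DSA_advanced | Prime_numbers/Assessment/number_of_open_doors.py | solve
-- ===== SOURCE A (Python) =====
-- def solve(A):
--     ls = [0] * (A + 1)
--     ls[0] = "N/A"
--     for i in range(1,A+1):
--         for j in range(i,A+1):
--             if j % i == 0:
--                 if ls[j] == 0:
--                     ls[j] = 1
--                 else:
--                     ls[j] = 0
--     count = 0
--     for i in ls:
--         if i == 1:
--             count += 1
--     return count
-- ===== SOURCE B (Python) =====
-- def solve(A):
--     # Door j stays open iff j has an odd number of divisors, i.e. j is a
--     # perfect square; so the answer is floor(sqrt(A)), found by binary search.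
--     lo, hi = 0, A
--     while lo < hi:
--         mid = (lo + hi + 1) // 2
--         if mid * mid <= A:
--             lo = mid
--         else:
--             hi = mid - 1
--     return lo
-- ===== Notes on version B (the rewrite author's own statement) =====
-- stated objective: faster
-- what changed: Replaces the O(A^2) sieve of divisor-toggles over an array of doors by a binary search for floor(sqrt(A)), using the fact that a door stays open iff its number is a perfect square.
-- outside the precondition, e.g. on solve(-1): A raises IndexError, B returns 0
import Mathlib
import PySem

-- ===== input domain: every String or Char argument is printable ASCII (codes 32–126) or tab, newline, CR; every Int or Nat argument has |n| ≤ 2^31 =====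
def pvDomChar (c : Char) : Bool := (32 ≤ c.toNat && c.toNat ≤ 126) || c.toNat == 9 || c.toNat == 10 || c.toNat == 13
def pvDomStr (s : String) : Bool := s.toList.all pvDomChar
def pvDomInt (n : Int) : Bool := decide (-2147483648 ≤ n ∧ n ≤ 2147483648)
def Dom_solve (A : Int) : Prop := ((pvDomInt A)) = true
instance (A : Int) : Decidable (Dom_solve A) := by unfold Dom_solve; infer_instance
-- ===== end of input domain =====

-- B replaces A's O(A^2) divisor-toggle sieve by a binary search for floor(sqrt(A)) (asymptotically faster).

-- ===== PORT A =====
-- Python's list holds the string "N/A" at index 0 and ints elsewhere; we port the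
-- elements as Option Int with `none` for "N/A" — exact, since "N/A" equals neither
-- 0 nor 1 in the comparisons the code performs, and `none` doesn't either.
def solve (A : Int) : Int :=
  let ls0 : List (Option Int) := (List.replicate (A + 1).toNat (some (0 : Int))).set 0 none
  let ls := (PySem.List.pyRange 1 (A + 1) 1).foldl (fun ls i =>
    (PySem.List.pyRange i (A + 1) 1).foldl (fun ls j =>
      if PySem.Int.mod j i == 0 then
        -- indices j here satisfy 1 ≤ j ≤ A, so `j.toNat` is exact
        (if ls.getD j.toNat none == some 0 then ls.set j.toNat (some 1)
         else ls.set j.toNat (some 0))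
      else ls) ls) ls0
  ls.foldl (fun count x => if x == some 1 then count + 1 else count) 0

-- ===== PORT B =====
-- Source B's while-loop, with a fuel counter for totality (hi - lo shrinks every
-- iteration, so fuel = A.toNat is never exhausted on the admitted inputs).
def solveAltLoop (A : Int) (fuel : Nat) (lo hi : Int) : Int :=
  match fuel with
  | 0 => lo
  | fuel + 1 =>
    if lo < hi then
      let mid := PySem.Int.floordiv (lo + hi + 1) 2
      if mid * mid ≤ A then solveAltLoop A fuel mid hi
      else solveAltLoop A fuel lo (mid - 1)
    else lo

def solve_alt (A : Int) : Int := solveAltLoop A A.toNat 0 A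

-- ===== PRECONDITION & SPEC =====
-- Python A raises IndexError for A < 0 (ls is then empty and ls[0] = "N/A" fails).
def Pre_solve (A : Int) : Prop := 0 ≤ A
instance (A : Int) : Decidable (Pre_solve A) := by unfold Pre_solve; infer_instance
def pvWitness_solve : Int := 9

def Spec_solve (A : Int) (out : Int) : Prop := out = solve_alt A
instance (A : Int) (out : Int) : Decidable (Spec_solve A out) := by unfold Spec_solve; infer_instance

-- ===== CLAIM (what is proved, stated in full; the proofs are below) =====
def Claim_equal_solve : Prop := ∀ (A : Int), Dom_solve A → Pre_solve A → Spec_solve A (solve A)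

-- ===== LEMMAS AND PROOFS =====

-- toggle of one cell, as A's loop body performs it
def tog (x : Option Int) : Option Int := if x == some 0 then some 1 else some 0

def togStep (ls : List (Option Int)) (j : Int) : List (Option Int) :=
  if ls.getD j.toNat none == some 0 then ls.set j.toNat (some 1) else ls.set j.toNat (some 0)

theorem length_togStep (ls : List (Option Int)) (j : Int) : (togStep ls j).length = ls.length := by
  unfold togStep; split <;> simp

theorem getElem?_togStep_self (ls : List (Option Int)) (j : Int) (k : Nat)
    (hk : k < ls.length) (hj : (k : Int) = j) :
    (togStep ls j)[k]? = some (tog (ls.getD k none)) := by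
  have hjk : j.toNat = k := by omega
  unfold togStep tog
  rw [hjk]
  simp only [List.getD_eq_getElem?_getD, List.getElem?_eq_getElem hk, Option.getD_some]
  split <;> simp [hk]

theorem getElem?_togStep_ne (ls : List (Option Int)) (j : Int) (k : Nat)
    (hj : 0 ≤ j) (hne : (k : Int) ≠ j) :
    (togStep ls j)[k]? = ls[k]? := by
  have hjk : j.toNat ≠ k := by omega
  unfold togStep
  split <;> rw [List.getElem?_set_ne hjk]

theorem foldl_togStep_getElem? (js : List Int) (ls : List (Option Int)) (k : Nat)
    (hpos : ∀ j ∈ js, 1 ≤ j) (hnd : js.Nodup) (hlen : ∀ j ∈ js, j.toNat < ls.length)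
    (hk : k < ls.length) :
    (js.foldl togStep ls)[k]? =
      if (k : Int) ∈ js then some (tog (ls.getD k none)) else ls[k]? := by
  induction js generalizing ls with
  | nil => simp
  | cons j t ih =>
    have hj1 : 1 ≤ j := hpos j (by simp)
    have hlen' : ∀ x ∈ t, x.toNat < (togStep ls j).length := by
      intro x hx; rw [length_togStep]; exact hlen x (by simp [hx])
    have hk' : k < (togStep ls j).length := by rw [length_togStep]; exact hk
    rw [List.foldl_cons, ih (togStep ls j) (fun x hx => hpos x (List.mem_cons_of_mem _ hx)) hnd.of_cons hlen' hk']
    by_cases hkj : (k : Int) = j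
    · have hknott : (k : Int) ∉ t := by
        rw [hkj]; exact (List.nodup_cons.mp hnd).1
      rw [if_neg hknott, if_pos (by simp [hkj])]
      exact getElem?_togStep_self ls j k hk hkj
    · have hgd : (togStep ls j).getD k none = ls.getD k none := by
        have := getElem?_togStep_ne ls j k (by omega) hkj
        simp [List.getD_eq_getElem?_getD, this]
      rw [hgd, getElem?_togStep_ne ls j k (by omega) hkj]
      by_cases hkt : (k : Int) ∈ t
      · simp [hkt, hkj]
      · simp [hkt, hkj]

theorem length_foldl_togStep (js : List Int) (ls : List (Option Int)) :
    (js.foldl togStep ls).length = ls.length := by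
  induction js generalizing ls with
  | nil => rfl
  | cons j t ih => simp [List.foldl_cons, ih, length_togStep]

-- value of a cell toggled c times, starting from some 0
def val (c : Nat) : Option Int := if c % 2 = 1 then some 1 else some 0

theorem tog_val (c : Nat) : tog (val c) = val (c + 1) := by
  rcases Nat.mod_two_eq_zero_or_one c with h | h <;>
    simp [val, tog, h, Nat.add_mod]

theorem tog_iterate_val (c : Nat) : tog^[c] (some 0) = val c := by
  induction c with
  | zero => simp [val]
  | succ n ih => rw [Function.iterate_succ_apply', ih, tog_val]

-- B side: the binary search computes the integer square root
theorem solveAltLoop_base (A lo : Int) (h0 : 0 ≤ lo) (hlo : lo * lo ≤ A)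
    (hhi : A < (lo + 1) * (lo + 1)) : lo = ((Nat.sqrt A.toNat : Nat) : Int) := by
  have hA : 0 ≤ A := le_trans (mul_self_nonneg lo) hlo
  have hl : (lo.toNat : Int) = lo := Int.toNat_of_nonneg h0
  have ha : (A.toNat : Int) = A := Int.toNat_of_nonneg hA
  have h1 : lo.toNat * lo.toNat ≤ A.toNat := by
    have : ((lo.toNat * lo.toNat : Nat) : Int) ≤ ((A.toNat : Nat) : Int) := by
      push_cast [hl, ha]; exact hlo
    exact_mod_cast this
  have h2 : A.toNat < (lo.toNat + 1) * (lo.toNat + 1) := by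
    have : ((A.toNat : Nat) : Int) < (((lo.toNat + 1) * (lo.toNat + 1) : Nat) : Int) := by
      push_cast [hl, ha]; exact hhi
    exact_mod_cast this
  have := (Nat.eq_sqrt (a := lo.toNat) (n := A.toNat)).mpr ⟨h1, h2⟩
  omega

theorem solveAltLoop_sqrt (A : Int) (n : Nat) : ∀ lo hi : Int, (hi - lo).toNat ≤ n →
    0 ≤ lo → lo ≤ hi → lo * lo ≤ A → A < (hi + 1) * (hi + 1) →
    solveAltLoop A n lo hi = ((Nat.sqrt A.toNat : Nat) : Int) := by
  induction n with
  | zero =>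
    intro lo hi hf h0 hlh hlo hhi
    have heq : lo = hi := by omega
    exact solveAltLoop_base A lo h0 hlo (heq ▸ hhi)
  | succ n ih =>
    intro lo hi hf h0 hlh hlo hhi
    rw [solveAltLoop]
    by_cases hc : lo < hi
    · rw [if_pos hc]
      have hmb := PySem.Int.floordiv_two_mid_bounds (lo := lo + 1) (hi := hi) (by omega)
      rw [show lo + 1 + hi = lo + hi + 1 from by ring] at hmb
      by_cases hm : PySem.Int.floordiv (lo + hi + 1) 2 * PySem.Int.floordiv (lo + hi + 1) 2 ≤ A
      · simp only [hm, if_true]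
        exact ih _ _ (by omega) (by omega) (by omega) hm hhi
      · simp only [hm, if_false]
        refine ih _ _ (by omega) h0 (by omega) hlo ?_
        rw [show PySem.Int.floordiv (lo + hi + 1) 2 - 1 + 1 = PySem.Int.floordiv (lo + hi + 1) 2 from by ring]
        omega
    · rw [if_neg hc]
      have heq : lo = hi := by omega
      exact solveAltLoop_base A lo h0 hlo (heq ▸ hhi)

theorem solve_alt_eq_sqrt (A : Int) (hA : 0 ≤ A) :
    solve_alt A = ((Nat.sqrt A.toNat : Nat) : Int) := by
  unfold solve_alt
  exact solveAltLoop_sqrt A A.toNat 0 A (by omega) le_rfl hA (by omega) (by nlinarith)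

-- A side: the sieve
theorem solve_eq_form (A : Int) : solve A =
    ((PySem.List.pyRange 1 (A + 1) 1).foldl (fun ls i =>
        (PySem.List.pyRange i (A + 1) 1).foldl
          (fun ls j => if PySem.Int.mod j i == 0 then togStep ls j else ls) ls)
      ((List.replicate (A + 1).toNat (some (0 : Int))).set 0 none)).foldl
      (fun count x => if x == some 1 then count + 1 else count) 0 := rfl

theorem inner_length (A i : Int) (ls : List (Option Int)) :
    ((PySem.List.pyRange i (A + 1) 1).foldl
      (fun ls j => if PySem.Int.mod j i == 0 then togStep ls j else ls) ls).length = ls.length := by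
  rw [PySem.List.foldl_if_eq_foldl_filter, length_foldl_togStep]

theorem inner_getElem? (A i : Int) (hi1 : 1 ≤ i) (ls : List (Option Int))
    (hlen : ls.length = (A + 1).toNat) (k : Nat) (hk : k < ls.length) :
    ((PySem.List.pyRange i (A + 1) 1).foldl
      (fun ls j => if PySem.Int.mod j i == 0 then togStep ls j else ls) ls)[k]? =
    if i ≤ (k : Int) ∧ (k : Int) < A + 1 ∧ i ∣ (k : Int) then some (tog (ls.getD k none))
    else ls[k]? := by
  rw [PySem.List.foldl_if_eq_foldl_filter]
  have hmem : ((k : Int) ∈ (PySem.List.pyRange i (A + 1) 1).filter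
      (fun j => PySem.Int.mod j i == 0)) ↔ (i ≤ (k : Int) ∧ (k : Int) < A + 1 ∧ i ∣ (k : Int)) := by
    simp [List.mem_filter, PySem.List.mem_pyRange_one, PySem.Int.mod_eq_zero_iff_dvd, and_assoc]
  rw [foldl_togStep_getElem? _ ls k ?pos ?nd ?len hk]
  · rw [if_congr hmem rfl rfl]
  case pos =>
    intro j hj
    have := (List.mem_filter.mp hj).1
    have := (PySem.List.mem_pyRange_one).mp this
    omega
  case nd => exact List.Nodup.filter _ (PySem.List.nodup_pyRange_one _ _)
  case len =>
    intro j hj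
    have := (PySem.List.mem_pyRange_one).mp (List.mem_filter.mp hj).1
    omega

def condB (A : Int) (k : Nat) (i : Int) : Bool :=
  decide (i ≤ (k : Int) ∧ (k : Int) < A + 1 ∧ i ∣ (k : Int))

theorem outer_length (A : Int) (is : List Int) (ls : List (Option Int)) :
    (is.foldl (fun ls i => (PySem.List.pyRange i (A + 1) 1).foldl
      (fun ls j => if PySem.Int.mod j i == 0 then togStep ls j else ls) ls) ls).length
      = ls.length := by
  induction is generalizing ls with
  | nil => rfl
  | cons i t ih => rw [List.foldl_cons, ih, inner_length]

theorem outer_getElem? (A : Int) (is : List Int) (hpos : ∀ i ∈ is, 1 ≤ i)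
    (ls : List (Option Int)) (hlen : ls.length = (A + 1).toNat) (k : Nat) (hk : k < ls.length) :
    (is.foldl (fun ls i => (PySem.List.pyRange i (A + 1) 1).foldl
      (fun ls j => if PySem.Int.mod j i == 0 then togStep ls j else ls) ls) ls)[k]? =
    some (tog^[is.countP (condB A k)] (ls.getD k none)) := by
  induction is generalizing ls with
  | nil =>
    simp only [List.foldl_nil, List.countP_nil, Function.iterate_zero, id_eq]
    rw [List.getElem?_eq_getElem hk, List.getD_eq_getElem ls none hk]
  | cons i t ih =>
    have hi1 : 1 ≤ i := hpos i (by simp)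
    have hlen' : ((PySem.List.pyRange i (A + 1) 1).foldl
        (fun ls j => if PySem.Int.mod j i == 0 then togStep ls j else ls) ls).length
        = ls.length := inner_length A i ls
    rw [List.foldl_cons, ih (fun x hx => hpos x (List.mem_cons_of_mem _ hx)) _
      (by rw [hlen', hlen]) (by rw [hlen']; exact hk)]
    have hgd := inner_getElem? A i hi1 ls hlen k hk
    rw [List.countP_cons]
    by_cases hcond : i ≤ (k : Int) ∧ (k : Int) < A + 1 ∧ i ∣ (k : Int)
    · rw [if_pos hcond] at hgd
      have : ((PySem.List.pyRange i (A + 1) 1).foldl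
          (fun ls j => if PySem.Int.mod j i == 0 then togStep ls j else ls) ls).getD k none
          = tog (ls.getD k none) := by
        rw [List.getD_eq_getElem?_getD, hgd]; rfl
      rw [this, show (condB A k i) = true from decide_eq_true hcond]
      simp only [if_true]
      rw [Function.iterate_succ_apply]
    · rw [if_neg hcond] at hgd
      have : ((PySem.List.pyRange i (A + 1) 1).foldl
          (fun ls j => if PySem.Int.mod j i == 0 then togStep ls j else ls) ls).getD k none
          = ls.getD k none := by
        rw [List.getD_eq_getElem?_getD, hgd, ← List.getD_eq_getElem?_getD]
      rw [this, show (condB A k i) = false from decide_eq_false hcond]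
      simp

-- the toggle count of cell k (1 ≤ k ≤ A) is the number of divisors of k
theorem cnt_eq (A : Int) (k : Nat) (hk1 : 1 ≤ k) (hk : (k : Int) ≤ A) :
    (PySem.List.pyRange 1 (A + 1) 1).countP (condB A k)
      = (List.range k).countP (fun t => decide ((t + 1) ∣ k)) := by
  rw [PySem.List.pyRange_one, List.countP_map,
    show A + 1 - 1 = A from by ring,
    show A.toNat = k + (A.toNat - k) from by omega,
    List.range_add, List.countP_append, List.countP_map]
  have h2 : (List.range (A.toNat - k)).countP
      ((condB A k ∘ fun x : Nat => (1 : Int) + ↑x) ∘ fun x => k + x) = 0 := by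
    rw [List.countP_eq_zero]
    intro a _
    simp only [Function.comp, condB, decide_eq_true_eq, not_and]
    intro h1
    exfalso; push_cast at h1; omega
  rw [h2, Nat.add_zero]
  apply List.countP_congr
  intro t ht
  have htk : t < k := List.mem_range.mp ht
  simp only [Function.comp, condB, decide_eq_true_eq]
  constructor
  · rintro ⟨_, _, hdvd⟩
    have : ((t + 1 : Nat) : Int) ∣ (k : Int) := by push_cast; convert hdvd using 1; ring
    exact_mod_cast this
  · intro hdvd
    refine ⟨by push_cast; omega, by omega, ?_⟩
    have : ((t + 1 : Nat) : Int) ∣ ((k : Nat) : Int) := Int.natCast_dvd_natCast.mpr hdvd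
    convert this using 1; push_cast; ring

theorem countP_range_eq_card (n : Nat) (p : Nat → Prop) [DecidablePred p] :
    (List.range n).countP (fun t => decide (p t)) = ((Finset.range n).filter p).card := by
  induction n with
  | zero => simp
  | succ m ih =>
    rw [List.range_succ, List.countP_append, ih, Finset.range_add_one, Finset.filter_insert]
    by_cases h : p m
    · rw [if_pos h, Finset.card_insert_of_notMem (by simp)]
      simp [h]
    · rw [if_neg h]; simp [h]

-- a positive number has an odd number of divisors iff it is a perfect square
theorem odd_divcount_iff (k : Nat) (hk : 1 ≤ k) :
    ((List.range k).countP (fun t => decide ((t + 1) ∣ k))) % 2 = 1 ↔ ∃ r, r * r = k := by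
  rw [countP_range_eq_card k (fun t => (t + 1) ∣ k)]
  set T := (Finset.range k).filter (fun t => (t + 1) ∣ k) with hT
  have hmem : ∀ t, t ∈ T ↔ t < k ∧ (t + 1) ∣ k := by
    intro t; simp [hT]
  have hmemT : ∀ d : Nat, 1 ≤ d → d ∣ k → (d - 1) ∈ T := by
    intro d hd hdk
    have hdle : d ≤ k := Nat.le_of_dvd (by omega) hdk
    rw [hmem]
    refine ⟨by omega, ?_⟩
    rw [show d - 1 + 1 = d from by omega]; exact hdk
  have hfacts : ∀ d : Nat, 1 ≤ d → d ∣ k →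
      1 ≤ k / d ∧ k / d ∣ k ∧ (k / d) * d = k ∧ k / (k / d) = d := by
    intro d hd hdk
    have hdle : d ≤ k := Nat.le_of_dvd (by omega) hdk
    exact ⟨Nat.div_pos hdle (by omega), Nat.div_dvd_of_dvd hdk,
      Nat.div_mul_cancel hdk, Nat.div_div_self hdk (by omega)⟩
  set L := T.filter (fun t => (t + 1) * (t + 1) < k) with hL
  set G := T.filter (fun t => k < (t + 1) * (t + 1)) with hG
  set E := T.filter (fun t => (t + 1) * (t + 1) = k) with hE
  have hsplit : T.card = L.card + (E.card + G.card) := by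
    have h1 := Finset.card_filter_add_card_filter_not (s := T)
      (p := fun t => (t + 1) * (t + 1) < k)
    have h2 := Finset.card_filter_add_card_filter_not
      (s := T.filter (fun t => ¬ (t + 1) * (t + 1) < k)) (p := fun t => (t + 1) * (t + 1) = k)
    have e1 : (T.filter (fun t => ¬ (t + 1) * (t + 1) < k)).filter
        (fun t => (t + 1) * (t + 1) = k) = E := by
      rw [Finset.filter_filter, hE]
      apply Finset.filter_congr
      intro x _; constructor
      · exact fun h => h.2
      · exact fun h => ⟨by omega, h⟩
    have e2 : (T.filter (fun t => ¬ (t + 1) * (t + 1) < k)).filter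
        (fun t => ¬ (t + 1) * (t + 1) = k) = G := by
      rw [Finset.filter_filter, hG]
      apply Finset.filter_congr
      intro x _; constructor
      · rintro ⟨ha, hb⟩; omega
      · intro h; omega
    rw [e1, e2] at h2
    rw [← hL] at h1
    omega
  have hLG : L.card = G.card := by
    refine Finset.card_nbij' (fun t => k / (t + 1) - 1) (fun t => k / (t + 1) - 1) ?_ ?_ ?_ ?_
    · intro a ha
      rw [Finset.mem_coe, hL, Finset.mem_filter] at ha
      obtain ⟨haT, halt⟩ := ha
      obtain ⟨hak, hdvd⟩ := (hmem a).mp haT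
      obtain ⟨he1, _, hmul, _⟩ := hfacts (a + 1) (by omega) hdvd
      rw [Finset.mem_coe, hG, Finset.mem_filter]
      refine ⟨hmemT _ he1 (Nat.div_dvd_of_dvd hdvd), ?_⟩
      rw [show k / (a + 1) - 1 + 1 = k / (a + 1) from by omega]
      set e := k / (a + 1) with he
      have hde : a + 1 < e := by nlinarith [hmul, halt, he1]
      nlinarith [hmul, hde, he1]
    · intro a ha
      rw [Finset.mem_coe, hG, Finset.mem_filter] at ha
      obtain ⟨haT, halt⟩ := ha
      obtain ⟨hak, hdvd⟩ := (hmem a).mp haT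
      obtain ⟨he1, _, hmul, _⟩ := hfacts (a + 1) (by omega) hdvd
      rw [Finset.mem_coe, hL, Finset.mem_filter]
      refine ⟨hmemT _ he1 (Nat.div_dvd_of_dvd hdvd), ?_⟩
      rw [show k / (a + 1) - 1 + 1 = k / (a + 1) from by omega]
      set e := k / (a + 1) with he
      have hde : e < a + 1 := by nlinarith [hmul, halt, he1]
      nlinarith [hmul, hde, he1]
    · intro a ha
      rw [Finset.mem_coe, hL, Finset.mem_filter] at ha
      obtain ⟨haT, _⟩ := ha
      obtain ⟨hak, hdvd⟩ := (hmem a).mp haT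
      obtain ⟨he1, _, _, hdd⟩ := hfacts (a + 1) (by omega) hdvd
      show k / (k / (a + 1) - 1 + 1) - 1 = a
      rw [show k / (a + 1) - 1 + 1 = k / (a + 1) from by omega, hdd]
      omega
    · intro a ha
      rw [Finset.mem_coe, hG, Finset.mem_filter] at ha
      obtain ⟨haT, _⟩ := ha
      obtain ⟨hak, hdvd⟩ := (hmem a).mp haT
      obtain ⟨he1, _, _, hdd⟩ := hfacts (a + 1) (by omega) hdvd
      show k / (k / (a + 1) - 1 + 1) - 1 = a
      rw [show k / (a + 1) - 1 + 1 = k / (a + 1) from by omega, hdd]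
      omega
  have hEpos : ∀ r, r * r = k → E.card = 1 := by
    intro r hr
    have hr1 : 1 ≤ r := by
      rcases Nat.eq_zero_or_pos r with h0 | h0
      · subst h0; simp at hr; omega
      · exact h0
    have hser : E = {r - 1} := by
      ext t
      rw [hE, Finset.mem_filter, Finset.mem_singleton]
      constructor
      · rintro ⟨_, hsq'⟩
        have : t + 1 = r := Nat.mul_self_inj.mp (by omega)
        omega
      · rintro rfl
        refine ⟨hmemT r hr1 ⟨r, hr.symm⟩, ?_⟩
        rw [show r - 1 + 1 = r from by omega]
        exact hr
    rw [hser]; simp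
  have hEneg : (¬ ∃ r, r * r = k) → E.card = 0 := by
    intro hsq
    have hser : E = ∅ := by
      ext t
      rw [hE, Finset.mem_filter]
      simp only [Finset.notMem_empty, iff_false, not_and]
      intro _ hsq'
      exact hsq ⟨t + 1, hsq'⟩
    rw [hser]; simp
  by_cases hsq : ∃ r, r * r = k
  · obtain ⟨r, hr⟩ := hsq
    have := hEpos r hr
    constructor
    · intro _; exact ⟨r, hr⟩
    · intro _; omega
  · have := hEneg hsq
    constructor
    · intro hodd; omega
    · intro h; exact absurd h hsq

theorem sqrt_succ_square (a r : Nat) (hr : r * r = a + 1) :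
    Nat.sqrt (a + 1) = Nat.sqrt a + 1 := by
  have hr1 : 1 ≤ r := by
    rcases Nat.eq_zero_or_pos r with h0 | h0
    · subst h0; simp at hr
    · exact h0
  obtain ⟨s, rfl⟩ : ∃ s, r = s + 1 := ⟨r - 1, by omega⟩
  have hx : a + 1 = s * s + 2 * s + 1 := by rw [← hr]; ring
  have h1 : Nat.sqrt (a + 1) = s + 1 := by rw [← hr, Nat.sqrt_eq]
  have h2 : s = Nat.sqrt a := by
    apply Nat.eq_sqrt.mpr
    have hexp : (s + 1) * (s + 1) = s * s + 2 * s + 1 := by ring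
    exact ⟨by omega, by omega⟩
  omega

theorem sqrt_succ_not (a : Nat) (h : ¬ ∃ r, r * r = a + 1) :
    Nat.sqrt (a + 1) = Nat.sqrt a := by
  have hle : Nat.sqrt a ≤ Nat.sqrt (a + 1) := Nat.sqrt_le_sqrt (by omega)
  by_contra hne
  have hgt : Nat.sqrt a + 1 ≤ Nat.sqrt (a + 1) := by omega
  have h1 : (Nat.sqrt a + 1) * (Nat.sqrt a + 1) ≤ Nat.sqrt (a + 1) * Nat.sqrt (a + 1) :=
    Nat.mul_le_mul hgt hgt
  have h2 := Nat.sqrt_le (a + 1)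
  have h3 := Nat.lt_succ_sqrt a
  rw [Nat.succ_eq_add_one] at h3
  exact h ⟨Nat.sqrt (a + 1), by omega⟩

-- the number of positive perfect squares up to a is √a
theorem sqcount (a : Nat) :
    (List.range (a + 1)).countP
      (fun k => decide (k ≠ 0 ∧ Nat.sqrt k * Nat.sqrt k = k)) = Nat.sqrt a := by
  induction a with
  | zero => simp
  | succ m ih =>
    rw [List.range_succ, List.countP_append, ih]
    by_cases hs : Nat.sqrt (m + 1) * Nat.sqrt (m + 1) = m + 1
    · rw [sqrt_succ_square m (Nat.sqrt (m + 1)) hs]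
      simp [hs]
    · have hnsq : ¬ ∃ r, r * r = m + 1 := by
        rintro ⟨r, hr⟩
        have hsr : Nat.sqrt (m + 1) = r := by rw [← hr, Nat.sqrt_eq]
        exact hs (by rw [hsr, hr])
      rw [sqrt_succ_not m hnsq]
      simp [hs]

theorem solve_eq_sqrt (A : Int) (hA : 0 ≤ A) : solve A = ((Nat.sqrt A.toNat : Nat) : Int) := by
  have hn : (A + 1).toNat = A.toNat + 1 := by omega
  rw [solve_eq_form]
  have hlen0 : ((List.replicate (A + 1).toNat (some (0 : Int))).set 0 none).length
      = (A + 1).toNat := by simp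
  have hchar : (PySem.List.pyRange 1 (A + 1) 1).foldl (fun ls i =>
      (PySem.List.pyRange i (A + 1) 1).foldl
        (fun ls j => if PySem.Int.mod j i == 0 then togStep ls j else ls) ls)
      ((List.replicate (A + 1).toNat (some (0 : Int))).set 0 none)
      = (List.range (A + 1).toNat).map (fun k =>
          if k = 0 then none
          else val ((List.range k).countP (fun t => decide ((t + 1) ∣ k)))) := by
    apply List.ext_getElem?
    intro i
    by_cases hi : i < (A + 1).toNat
    · rw [outer_getElem? A _ (fun x hx => by
          have := (PySem.List.mem_pyRange_one).mp hx; omega) _ hlen0 i (by rw [hlen0]; exact hi)]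
      rw [List.getElem?_map, List.getElem?_range hi]
      simp only [Option.map_some]
      by_cases hi0 : i = 0
      · subst hi0
        have hgd : ((List.replicate (A + 1).toNat (some (0 : Int))).set 0 none).getD 0 none
            = none := by
          rw [List.getD_eq_getElem?_getD]
          simp [hi]
        have hcnt : (PySem.List.pyRange 1 (A + 1) 1).countP (condB A 0) = 0 := by
          rw [List.countP_eq_zero]
          intro x hx
          have hx1 := (PySem.List.mem_pyRange_one).mp hx
          simp only [condB, decide_eq_true_eq]
          rintro ⟨h1, -⟩
          omega
        rw [hgd, hcnt]
        rfl
      · have hgd : ((List.replicate (A + 1).toNat (some (0 : Int))).set 0 none).getD i none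
            = some 0 := by
          rw [List.getD_eq_getElem?_getD, List.getElem?_set_ne (by omega)]
          simp [hi]
        have hk1 : 1 ≤ i := by omega
        have hkA : (i : Int) ≤ A := by omega
        rw [hgd, cnt_eq A i hk1 hkA, tog_iterate_val]
        simp [hi0]
    · rw [List.getElem?_eq_none (by rw [outer_length, hlen0]; omega),
          List.getElem?_eq_none (by simp; omega)]
  rw [hchar, PySem.List.foldl_beq_add_one, List.count_eq_countP, List.countP_map]
  have hcong : (List.range (A + 1).toNat).countP
      ((fun x => x == some (1 : Int)) ∘ (fun k => if k = 0 then none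
        else val ((List.range k).countP (fun t => decide ((t + 1) ∣ k)))))
      = (List.range (A + 1).toNat).countP
        (fun k => decide (k ≠ 0 ∧ Nat.sqrt k * Nat.sqrt k = k)) := by
    apply List.countP_congr
    intro x hx
    have hxlt : x < (A + 1).toNat := List.mem_range.mp hx
    by_cases hx0 : x = 0
    · subst hx0; simp [val]
    · have hx1 : 1 ≤ x := by omega
      simp only [Function.comp, if_neg hx0]
      have hv : ((val ((List.range x).countP (fun t => decide ((t + 1) ∣ x)))
          == some (1 : Int)) = true)
          ↔ ((List.range x).countP (fun t => decide ((t + 1) ∣ x))) % 2 = 1 := by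
        unfold val
        by_cases hcc : ((List.range x).countP (fun t => decide ((t + 1) ∣ x))) % 2 = 1 <;>
          simp [hcc]
      rw [hv, odd_divcount_iff x hx1]
      simp only [decide_eq_true_eq]
      constructor
      · rintro ⟨r, hr⟩
        exact ⟨hx0, by rw [← hr, Nat.sqrt_eq]⟩
      · rintro ⟨-, hs⟩
        exact ⟨Nat.sqrt x, hs⟩
  rw [hcong, hn, sqcount]
  simp

-- ===== VERDICT (by name: the statement is the Claim_ definition above) =====
theorem solve_spec : Claim_equal_solve := by
  intro A _ hpre
  unfold Spec_solve
  rw [solve_eq_sqrt A hpre, solve_alt_eq_sqrt A hpre]
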